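-- pv_equiv track=rewrite | github.com/AmamiRena/py | Summer2018_COMP1012/Ass#3/StatisticsCalculation.py | findPassedFailed
-- ===== SOURCE A (Python) =====
-- def findPassedFailed(data, cutoffMark):
--     '''
--     find number of pass/fail students
--     '''
--     assert type(data)==list and type(cutoffMark)==int
--     TOTAL_,FAILNUM=0,0 #sum of midterm and final marks, number of fail students
--     for i_ in range(len(data[0])):
--         for n_ in range(len(data)):
--             TOTAL_+=data[n_][i_]
--         if TOTAL_<cutoffMark:
--             FAILNUM+=1
--         TOTAL_=0
--     return len(data[0])-FAILNUM,FAILNUM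
-- ===== SOURCE B (Python) =====
-- def findPassedFailed(data, cutoffMark):
--     '''
--     find number of pass/fail students
--     '''
--     assert type(data)==list and type(cutoffMark)==int
--     w = len(data[0])
--     sums = [0] * w
--     for row in data:
--         sums = [s + x for s, x in zip(sums, row)]
--     failnum = sum(1 for s in sums if s < cutoffMark)
--     return w - failnum, failnum
-- ===== Notes on version B (the rewrite author's own statement) =====
-- stated objective: alternative
-- what changed: Replaces the column-major double index loop (recomputing len-based ranges per column) with a single row-major pass maintaining a running column-sums vector via zip, then counts failing columns once.
import Mathlib
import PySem

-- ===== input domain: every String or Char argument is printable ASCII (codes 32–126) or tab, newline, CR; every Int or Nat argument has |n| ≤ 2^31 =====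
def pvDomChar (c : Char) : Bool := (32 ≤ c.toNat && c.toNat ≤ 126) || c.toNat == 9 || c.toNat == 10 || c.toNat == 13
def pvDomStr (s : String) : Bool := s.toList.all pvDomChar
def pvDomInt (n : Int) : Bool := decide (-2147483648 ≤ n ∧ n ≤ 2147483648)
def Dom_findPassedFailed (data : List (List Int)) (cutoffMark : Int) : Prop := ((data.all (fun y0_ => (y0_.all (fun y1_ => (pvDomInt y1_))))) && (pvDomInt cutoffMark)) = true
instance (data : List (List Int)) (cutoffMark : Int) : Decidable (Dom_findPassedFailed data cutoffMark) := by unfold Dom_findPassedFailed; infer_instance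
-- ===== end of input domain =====

-- B replaces A's column-major double index loop with a single row-major pass maintaining a
-- running column-sums vector (zip), then counts failing columns once (objective: alternative).


-- ===== PORT A =====
-- for i_ in range(len(data[0])): for n_ in range(len(data)): TOTAL_ += data[n_][i_]; …
-- data[0] on empty data and data[n_][i_] on too-short rows raise IndexError in Python: excluded by Pre_.
def findPassedFailed (data : List (List Int)) (cutoffMark : Int) : Int × Int :=
  let res :=
    (PySem.List.pyRange 0 ((data.headD []).length : Int) 1).foldl
      (fun (st : Int × Int) i =>
        let total :=
          (PySem.List.pyRange 0 (PySem.List.len data) 1).foldl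
            (fun t n => t + PySem.List.pyGetD (PySem.List.pyGetD data n []) i 0) st.1
        let failnum := if total < cutoffMark then st.2 + 1 else st.2
        (0, failnum))
      (0, 0)
  (((data.headD []).length : Int) - res.2, res.2)

-- ===== PORT B =====
-- sums = [0]*w; for row in data: sums = [s + x for s, x in zip(sums, row)]; count sums < cutoff.
def findPassedFailed_alt (data : List (List Int)) (cutoffMark : Int) : Int × Int :=
  let w := (data.headD []).length
  let sums := data.foldl (fun sums row => List.zipWith (· + ·) sums row) (List.replicate w 0)
  let failnum : Int := (sums.countP (fun s => s < cutoffMark) : Int)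
  ((w : Int) - failnum, failnum)

-- ===== PRECONDITION & SPEC =====
-- Pre_ excludes exactly the inputs where Python A raises IndexError: empty data (data[0])
-- and ragged data with some row shorter than the first row (data[n_][i_]).
def Pre_findPassedFailed (data : List (List Int)) (cutoffMark : Int) : Prop :=
  data ≠ [] ∧ ∀ row ∈ data, (data.headD []).length ≤ row.length
instance (data : List (List Int)) (cutoffMark : Int) : Decidable (Pre_findPassedFailed data cutoffMark) := by unfold Pre_findPassedFailed; infer_instance
def pvWitness_findPassedFailed : List (List Int) × Int := ([[50, 30], [40, 35]], 80)

def Spec_findPassedFailed (data : List (List Int)) (cutoffMark : Int) (out : Int × Int) : Prop := out = findPassedFailed_alt data cutoffMark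
instance (data : List (List Int)) (cutoffMark : Int) (out : Int × Int) : Decidable (Spec_findPassedFailed data cutoffMark out) := by unfold Spec_findPassedFailed; infer_instance

-- ===== CLAIM (what is proved, stated in full; the proofs are below) =====
def Claim_equal_findPassedFailed : Prop := ∀ (data : List (List Int)) (cutoffMark : Int), Dom_findPassedFailed data cutoffMark → Pre_findPassedFailed data cutoffMark → Spec_findPassedFailed data cutoffMark (findPassedFailed data cutoffMark)

-- ===== LEMMAS AND PROOFS =====

-- column sum of column j (Nat index, missing entries read as 0)
def csum (data : List (List Int)) (j : Nat) : Int :=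
  data.foldl (fun t row => t + row.getD j 0) 0

theorem csum_cons (row : List Int) (rest : List (List Int)) (j : Nat) :
    csum (row :: rest) j = row.getD j 0 + csum rest j := by
  simp only [csum, List.foldl_cons, PySem.List.foldl_add, zero_add]

-- A's outer loop: the pair state collapses to pure counting of failing columns
theorem outerA (data : List (List Int)) (c : Int) (L : List Int) (F : Int) :
    L.foldl
      (fun (st : Int × Int) i =>
        let total :=
          (PySem.List.pyRange 0 (PySem.List.len data) 1).foldl
            (fun t n => t + PySem.List.pyGetD (PySem.List.pyGetD data n []) i 0) st.1
        let failnum := if total < c then st.2 + 1 else st.2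
        (0, failnum))
      (0, F)
    = (0, F + (L.countP
        (fun i => decide ((data.foldl (fun t row => t + PySem.List.pyGetD row i 0) 0) < c)) : Int)) := by
  induction L generalizing F with
  | nil => simp
  | cons i L ih =>
    simp only [List.foldl_cons, List.countP_cons]
    rw [PySem.List.foldl_pyRange_zero_pyGetD data [] (fun t row => t + PySem.List.pyGetD row i 0), ih]
    by_cases h : (data.foldl (fun t row => t + PySem.List.pyGetD row i 0) 0) < c
    · simp [h]; ring
    · simp [h]

-- B's fold over the rows computes the column-sum vector (rows all at least as long as s)
theorem sumsB (data : List (List Int)) : ∀ (s : List Int),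
    (∀ row ∈ data, s.length ≤ row.length) →
    data.foldl (fun sums row => List.zipWith (· + ·) sums row) s
      = (List.range s.length).map (fun j => s.getD j 0 + csum data j) := by
  induction data with
  | nil =>
    intro s _
    simp only [List.foldl_nil, csum, List.foldl_nil, add_zero]
    apply List.ext_getElem
    · simp
    · intro i h1 h2
      simp only [List.getElem_map, List.getElem_range] at *
      simp [List.getD_eq_getElem?_getD, List.getElem?_eq_getElem h1]
  | cons row rest ih =>
    intro s hlen
    have hrow : s.length ≤ row.length := hlen row (by simp)
    have hlen' : (List.zipWith (· + ·) s row).length = s.length := by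
      simp [List.length_zipWith]; omega
    simp only [List.foldl_cons]
    rw [ih (List.zipWith (· + ·) s row)
        (fun r hr => by rw [hlen']; exact hlen r (by simp [hr])), hlen']
    apply List.map_congr_left
    intro j hj
    rw [List.mem_range] at hj
    have hj' : j < (List.zipWith (· + ·) s row).length := by omega
    rw [List.getD_eq_getElem _ _ hj', List.getElem_zipWith, csum_cons,
        List.getD_eq_getElem _ _ hj, List.getD_eq_getElem _ _ (by omega : j < row.length)]
    ring

-- the Int-indexed column sum A computes equals the Nat-indexed one
theorem pycol_eq (data : List (List Int)) (j : Nat) :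
    data.foldl (fun t row => t + PySem.List.pyGetD row (j : Int) 0) 0 = csum data j := by
  simp [csum, PySem.List.pyGetD_natCast]

theorem findPassedFailed_eq (data : List (List Int)) (c : Int)
    (hp : Pre_findPassedFailed data c) :
    findPassedFailed data c = findPassedFailed_alt data c := by
  obtain ⟨hne, hlen⟩ := hp
  have hw : (List.replicate (data.headD []).length (0 : Int)).length = (data.headD []).length := by
    simp
  have hcnt : List.countP (fun (j : Nat) =>
        decide (List.foldl (fun t row => t + PySem.List.pyGetD row (j : Int) 0) 0 data < c))
        (List.range (data.headD []).length)
      = List.countP (fun (j : Nat) =>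
        decide ((List.replicate (data.headD []).length (0 : Int)).getD j 0 + csum data j < c))
        (List.range (data.headD []).length) := by
    apply List.countP_congr
    intro j hj
    simp only [decide_eq_true_eq]
    rw [pycol_eq]
    simp
  unfold findPassedFailed findPassedFailed_alt
  dsimp only
  rw [outerA, sumsB data _ (by intro r hr; rw [hw]; exact hlen r hr), hw, zero_add]
  simp only [List.countP_map, PySem.List.pyRange_zero_nat, Function.comp_def]
  rw [hcnt]

-- ===== VERDICT (by name: the statement is the Claim_ definition above) =====
theorem findPassedFailed_spec : Claim_equal_findPassedFailed := by
  intro data c _ hp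
  unfold Spec_findPassedFailed
  exact findPassedFailed_eq data c hp
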